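-- pv_equiv track=rewrite | github.com/jinye-gong/DD2360HT25-Applied_GPU_Programming | homework_2/Q[1]/generate_histogram_data.py | parse_histogram_output
-- ===== SOURCE A (Python) =====
-- def parse_histogram_output(output):
--     """Parse histogram output to extract bin counts from CSV section."""
--     lines = output.split('\n')
--     bins = []
--     counts = []
--
--     # Look for CSV_OUTPUT_START marker
--     in_csv_section = False
--     for line in lines:
--         if '# CSV_OUTPUT_START' in line:
--             in_csv_section = True
--             continue
--         if '# CSV_OUTPUT_END' in line:
--             break
--         if in_csv_section:
--             # Skip header line
--             if line.strip() == 'bin,count' or line.strip().startswith('bin'):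
--                 continue
--             # Parse CSV line
--             parts = line.strip().split(',')
--             if len(parts) == 2:
--                 try:
--                     bins.append(int(parts[0]))
--                     counts.append(int(parts[1]))
--                 except ValueError:
--                     continue
--
--     return bins, counts
-- ===== SOURCE B (Python) =====
-- def parse_histogram_output(output):
--     """Parse histogram output: locate the CSV section boundaries first, then parse the slice."""
--     lines = output.split('\n')
--     end = next((i for i, line in enumerate(lines) if '# CSV_OUTPUT_END' in line), len(lines))
--     start = next((i for i, line in enumerate(lines[:end]) if '# CSV_OUTPUT_START' in line), None)
--     if start is None:
--         return [], []
--     bins = []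
--     counts = []
--     for line in lines[start + 1:end]:
--         if '# CSV_OUTPUT_START' in line or line.strip().startswith('bin'):
--             continue
--         parts = line.strip().split(',')
--         if len(parts) == 2:
--             try:
--                 b, c = int(parts[0]), int(parts[1])
--             except ValueError:
--                 continue
--             bins.append(b)
--             counts.append(c)
--     return bins, counts
-- ===== Notes on version B (the rewrite author's own statement) =====
-- stated objective: alternative
-- what changed: B first locates the boundary indices of the first '# CSV_OUTPUT_END' line and the first '# CSV_OUTPUT_START' line before it, then parses the slice between them in a separate pass, instead of A's single loop with an in_csv_section flag, continue and break; B also appends a row only when both fields parse as ints.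
-- intended difference: On inputs whose CSV section contains a two-field row whose first field parses as an int but whose second does not (e.g. '1,x'), A appends the bin before int(count) raises and returns bins/counts lists of mismatched lengths, while B skips the whole row and keeps the two lists aligned, which is the intended histogram pairing. — e.g. on parse_histogram_output("# CSV_OUTPUT_START\n1,x\n2,3"): A returns ([1, 2], [3]), B returns ([2], [3])
-- outside the precondition, e.g. on parse_histogram_output('# CSV_OUTPUT_START # CSV_OUTPUT_END\n1,2'): A returns ([1], [2]), B returns ([], [])
import Mathlib
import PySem

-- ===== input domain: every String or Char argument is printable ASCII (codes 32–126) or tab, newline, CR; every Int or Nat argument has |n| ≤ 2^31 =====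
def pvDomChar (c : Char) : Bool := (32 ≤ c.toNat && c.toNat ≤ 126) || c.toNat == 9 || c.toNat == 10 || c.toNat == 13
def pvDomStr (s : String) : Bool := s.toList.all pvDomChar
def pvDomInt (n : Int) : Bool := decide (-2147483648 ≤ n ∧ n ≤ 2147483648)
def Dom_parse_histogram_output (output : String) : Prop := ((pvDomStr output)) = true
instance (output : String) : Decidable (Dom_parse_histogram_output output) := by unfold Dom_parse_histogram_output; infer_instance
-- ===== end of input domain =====

-- B parses the CSV section by first locating the boundary markers and then making one parsing pass
-- over the slice between them, instead of A's single stateful flag loop; B also appends a row only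
-- when BOTH of its fields parse as ints (A appends the bin before the count's parse can fail).

-- shared line-level helpers (transliterations of the Python string operations)
def pvStartMark (l : List Char) : Bool := PySem.Chars.isIn "# CSV_OUTPUT_START".toList l
def pvEndMark (l : List Char) : Bool := PySem.Chars.isIn "# CSV_OUTPUT_END".toList l
def pvLines (output : String) : List (List Char) := PySem.Chars.splitOn output.toList ['\n']
def pvHeaderB (l : List Char) : Bool := PySem.Chars.startswith (PySem.Chars.strip l) "bin".toList
def pvParts (l : List Char) : List (List Char) := PySem.Chars.splitOn (PySem.Chars.strip l) [',']

-- ===== PORT A =====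
-- A's for-loop with the in_csv_section flag, continue and break, as structural recursion
def pvLoopA : List (List Char) → Bool → List Int → List Int → List Int × List Int
  | [], _, bins, counts => (bins, counts)
  | l :: rest, flag, bins, counts =>
    if pvStartMark l then pvLoopA rest true bins counts
    else if pvEndMark l then (bins, counts)
    else if flag then
      if PySem.Chars.strip l == "bin,count".toList
          || PySem.Chars.startswith (PySem.Chars.strip l) "bin".toList then
        pvLoopA rest flag bins counts
      else
        let parts := pvParts l
        if parts.length == 2 then
          -- parts[0] / parts[1] are safe here (length = 2), so getD is exact
          match PySem.Int.ofChars? (parts.getD 0 []) with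
          | none => pvLoopA rest flag bins counts          -- int(parts[0]) raises: nothing appended
          | some b =>
            match PySem.Int.ofChars? (parts.getD 1 []) with
            | none => pvLoopA rest flag (bins ++ [b]) counts   -- int(parts[1]) raises AFTER bins.append
            | some c => pvLoopA rest flag (bins ++ [b]) (counts ++ [c])
        else pvLoopA rest flag bins counts
    else pvLoopA rest flag bins counts

def parse_histogram_output (output : String) : List Int × List Int :=
  pvLoopA (pvLines output) false [] []

-- ===== PORT B =====
-- one row of B's parsing pass over the slice
def pvParseRow (acc : List Int × List Int) (l : List Char) : List Int × List Int :=
  if pvStartMark l || pvHeaderB l then acc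
  else
    let parts := pvParts l
    if parts.length == 2 then
      match PySem.Int.ofChars? (parts.getD 0 []), PySem.Int.ofChars? (parts.getD 1 []) with
      | some b, some c => (acc.1 ++ [b], acc.2 ++ [c])
      | _, _ => acc
    else acc

-- the lines strictly between the first END boundary and the first START before it (none = no section)
def pvSection (lines : List (List Char)) : Option (List (List Char)) :=
  match (lines.take ((lines.findIdx? pvEndMark).getD lines.length)).findIdx? pvStartMark with
  | none => none
  | some s =>
    some ((lines.take ((lines.findIdx? pvEndMark).getD lines.length)).drop (s + 1))

def parse_histogram_output_alt (output : String) : List Int × List Int :=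
  match pvSection (pvLines output) with
  | none => ([], [])
  | some sec => sec.foldl pvParseRow ([], [])

-- ===== PRECONDITION & SPEC =====
-- Pre_ excludes strings in which one physical line contains BOTH markers: which marker such a
-- degenerate line stands for is anybody's choice (A reads it as START, B as the END boundary).
def Pre_parse_histogram_output (output : String) : Prop :=
  (PySem.Chars.splitOn output.toList ['\n']).all
    (fun l => !(PySem.Chars.isIn "# CSV_OUTPUT_START".toList l
                 && PySem.Chars.isIn "# CSV_OUTPUT_END".toList l)) = true
instance (output : String) : Decidable (Pre_parse_histogram_output output) := by
  unfold Pre_parse_histogram_output; infer_instance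

def pvWitness_parse_histogram_output : String := "# CSV_OUTPUT_START\n1,2\n# CSV_OUTPUT_END"

-- On inputs whose CSV section contains a two-field row whose first field is an int but whose second
-- is not, A returns mismatched lists (the bin is appended before int(count) raises) while B skips the
-- whole row and keeps bins and counts aligned, which is the intended histogram pairing.
def D_parse_histogram_output (output : String) : Prop :=
  ((((PySem.Chars.splitOn output.toList ['\n']).takeWhile
      (fun l => !PySem.Chars.isIn "# CSV_OUTPUT_END".toList l)).dropWhile
      (fun l => !PySem.Chars.isIn "# CSV_OUTPUT_START".toList l)).tail.any
    (fun l => !PySem.Chars.isIn "# CSV_OUTPUT_START".toList l &&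
      !PySem.Chars.startswith (PySem.Chars.strip l) "bin".toList &&
      match PySem.Chars.splitOn (PySem.Chars.strip l) [','] with
      | [a, b] => (PySem.Int.ofChars? a).isSome && (PySem.Int.ofChars? b).isNone
      | _ => false)) = true
instance (output : String) : Decidable (D_parse_histogram_output output) := by
  unfold D_parse_histogram_output; infer_instance

def Spec_parse_histogram_output (output : String) (out : List Int × List Int) : Prop :=
  ¬ D_parse_histogram_output output → out = parse_histogram_output_alt output
instance (output : String) (out : List Int × List Int) : Decidable (Spec_parse_histogram_output output out) := by
  unfold Spec_parse_histogram_output; infer_instance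

def pvDiffWitness_parse_histogram_output : String := "# CSV_OUTPUT_START\n1,x\n2,3"
def pvDiffWitnessOut_parse_histogram_output : (List Int × List Int) × (List Int × List Int) :=
  (([1, 2], [3]), ([2], [3]))

-- ===== CLAIM (what is proved, stated in full; the proofs are below) =====
def Claim_unchanged_parse_histogram_output : Prop := ∀ (output : String), Dom_parse_histogram_output output → Pre_parse_histogram_output output → Spec_parse_histogram_output output (parse_histogram_output output)
def Claim_changed_parse_histogram_output : Prop := Dom_parse_histogram_output (pvDiffWitness_parse_histogram_output) ∧ Pre_parse_histogram_output (pvDiffWitness_parse_histogram_output) ∧ D_parse_histogram_output (pvDiffWitness_parse_histogram_output) ∧ parse_histogram_output (pvDiffWitness_parse_histogram_output) = pvDiffWitnessOut_parse_histogram_output.1 ∧ parse_histogram_output_alt (pvDiffWitness_parse_histogram_output) = pvDiffWitnessOut_parse_histogram_output.2 ∧ pvDiffWitnessOut_parse_histogram_output.1 ≠ pvDiffWitnessOut_parse_histogram_output.2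
def Claim_exact_parse_histogram_output : Prop := ∀ (output : String), Dom_parse_histogram_output output → Pre_parse_histogram_output output → D_parse_histogram_output output → parse_histogram_output output ≠ parse_histogram_output_alt output

-- ===== LEMMAS AND PROOFS =====

-- proof-only: D_'s row predicate phrased with the ports' helpers (definitionally the same)
def pvMismatch (l : List Char) : Bool :=
  !pvStartMark l && !pvHeaderB l
    && match pvParts l with
       | [a, b] => (PySem.Int.ofChars? a).isSome && (PySem.Int.ofChars? b).isNone
       | _ => false

-- proof-only: what one line of A's true-flag phase does to (bins, counts)
def pvRowA (acc : List Int × List Int) (l : List Char) : List Int × List Int :=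
  if pvStartMark l || pvHeaderB l then acc
  else if (pvParts l).length == 2 then
    match PySem.Int.ofChars? ((pvParts l).getD 0 []), PySem.Int.ofChars? ((pvParts l).getD 1 []) with
    | some b, none => (acc.1 ++ [b], acc.2)
    | some b, some c => (acc.1 ++ [b], acc.2 ++ [c])
    | _, _ => acc
  else acc

-- proof-only reformulation of pvSection via takeWhile
def pvSectionTW (ls : List (List Char)) : Option (List (List Char)) :=
  match (ls.takeWhile (fun l => !pvEndMark l)).findIdx? pvStartMark with
  | none => none
  | some s => some ((ls.takeWhile (fun l => !pvEndMark l)).drop (s + 1))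

theorem pvTake_findIdx (p : List Char → Bool) (xs : List (List Char)) :
    xs.take ((xs.findIdx? p).getD xs.length) = xs.takeWhile (fun x => !p x) := by
  induction xs with
  | nil => rfl
  | cons x xs ih =>
    rw [List.findIdx?_cons]
    by_cases h : p x = true
    · simp [h]
    · simp only [h, Bool.false_eq_true, if_false, List.takeWhile_cons, Bool.not_false, if_true]
      cases hf : xs.findIdx? p with
      | none => simpa [hf] using congrArg (x :: ·) (by simpa [hf] using ih)
      | some k => simpa [hf] using congrArg (x :: ·) (by simpa [hf] using ih)

theorem pvSection_eq_TW (lines : List (List Char)) : pvSection lines = pvSectionTW lines := by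
  unfold pvSection pvSectionTW
  rw [pvTake_findIdx]

-- the tail of dropWhile is the slice after the first matching line
theorem pvTail_dropWhile (p : List Char → Bool) (xs : List (List Char)) :
    (xs.dropWhile (fun x => !p x)).tail
      = (match xs.findIdx? p with
         | none => []
         | some s => xs.drop (s + 1)) := by
  induction xs with
  | nil => rfl
  | cons x xs ih =>
    rw [List.findIdx?_cons, List.dropWhile_cons]
    by_cases h : p x = true
    · simp [h]
    · simp only [h, Bool.false_eq_true, if_false, Bool.not_false, if_true]
      rw [ih]
      cases hf : xs.findIdx? p with
      | none => simp
      | some k => simp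

-- D_'s row predicate and pvMismatch agree
theorem pvMismatch_iff_pred (l : List Char) :
    pvMismatch l
      = (!PySem.Chars.isIn "# CSV_OUTPUT_START".toList l &&
          !PySem.Chars.startswith (PySem.Chars.strip l) "bin".toList &&
          match PySem.Chars.splitOn (PySem.Chars.strip l) [','] with
          | [a, b] => (PySem.Int.ofChars? a).isSome && (PySem.Int.ofChars? b).isNone
          | _ => false) := by
  rw [show PySem.Chars.splitOn (PySem.Chars.strip l) [','] = pvParts l from rfl]
  rw [show PySem.Chars.isIn "# CSV_OUTPUT_START".toList l = pvStartMark l from rfl]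
  rw [show PySem.Chars.startswith (PySem.Chars.strip l) "bin".toList = pvHeaderB l from rfl]
  unfold pvMismatch
  cases pvParts l with
  | nil => simp
  | cons a t =>
    cases t with
    | nil => simp
    | cons b t2 =>
      cases t2 with
      | nil => simp
      | cons c t3 => simp

-- a non-mismatch line drives A's row action and B's row action alike
theorem pvRow_eq_of_not_mismatch (l : List Char) (h : pvMismatch l = false) :
    ∀ acc, pvRowA acc l = pvParseRow acc l := by
  intro acc
  unfold pvRowA pvParseRow
  by_cases hsk : (pvStartMark l || pvHeaderB l) = true
  · simp [hsk]
  · have hs : pvStartMark l = false := by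
      cases hv : pvStartMark l
      · rfl
      · exact absurd (by simp [hv]) hsk
    have hb : pvHeaderB l = false := by
      cases hv : pvHeaderB l
      · rfl
      · exact absurd (by simp [hv]) hsk
    simp only [hs, hb, Bool.or_false, Bool.false_eq_true, if_false]
    by_cases hlen : ((pvParts l).length == 2) = true
    · simp only [hlen, if_true]
      cases h0 : PySem.Int.ofChars? ((pvParts l).getD 0 []) with
      | none => rfl
      | some b =>
        cases h1 : PySem.Int.ofChars? ((pvParts l).getD 1 []) with
        | none =>
          exfalso
          have hlen2 : (pvParts l).length = 2 := by simpa using hlen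
          have : pvMismatch l = true := by
            unfold pvMismatch
            cases hp : pvParts l with
            | nil => rw [hp] at hlen2; simp at hlen2
            | cons a t =>
              cases t with
              | nil => rw [hp] at hlen2; simp at hlen2
              | cons b' t2 =>
                cases t2 with
                | nil =>
                  rw [hp] at h0 h1
                  simp only [List.getD_eq_getElem?_getD, List.getElem?_cons_zero,
                    List.getElem?_cons_succ, Option.getD_some] at h0 h1
                  simp [h0, h1, hs, hb]
                | cons c t3 => rw [hp] at hlen2; simp at hlen2
          rw [h] at this; exact Bool.false_ne_true this
        | some c => rfl
    · simp [hlen]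

-- the true-flag phase of A is a fold of pvRowA over the lines before the first END marker
theorem pvLoopA_true (ls : List (List Char)) :
    ∀ (bins counts : List Int),
      (∀ l ∈ ls, ¬(pvStartMark l = true ∧ pvEndMark l = true)) →
      pvLoopA ls true bins counts
        = (ls.takeWhile (fun l => !pvEndMark l)).foldl pvRowA (bins, counts) := by
  induction ls with
  | nil => intro bins counts _; rfl
  | cons l rest ih =>
    intro bins counts hpre
    by_cases hs : pvStartMark l = true
    · have he : pvEndMark l = false := by
        have := hpre l (by simp)
        cases h : pvEndMark l
        · rfl
        · exact absurd ⟨hs, h⟩ this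
      have hrow : pvRowA (bins, counts) l = (bins, counts) := by
        simp [pvRowA, hs]
      simp only [pvLoopA, hs, if_true, List.takeWhile_cons, he, Bool.not_false,
        List.foldl_cons, hrow]
      exact ih bins counts (fun x hx => hpre x (by simp [hx]))
    · by_cases he : pvEndMark l = true
      · simp [pvLoopA, hs, he]
      · have he' : pvEndMark l = false := by simpa using he
        have hs' : pvStartMark l = false := by simpa using hs
        have hpre' : ∀ x ∈ rest, ¬(pvStartMark x = true ∧ pvEndMark x = true) :=
          fun x hx => hpre x (by simp [hx])
        simp only [List.takeWhile_cons, he', Bool.not_false, if_true, List.foldl_cons]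
        by_cases hh : (PySem.Chars.strip l == "bin,count".toList
            || PySem.Chars.startswith (PySem.Chars.strip l) "bin".toList) = true
        · have hhb : pvHeaderB l = true := by
            rcases Bool.or_eq_true_iff.mp hh with h1 | h1
            · have : PySem.Chars.strip l = "bin,count".toList := by simpa using h1
              unfold pvHeaderB; rw [this]; decide
            · exact h1
          have hrow : pvRowA (bins, counts) l = (bins, counts) := by
            simp [pvRowA, hs', hhb]
          simp only [pvLoopA, hs', he', Bool.false_eq_true, if_false, hh, if_true, hrow]
          exact ih bins counts hpre'
        · have hhb : pvHeaderB l = false := by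
            unfold pvHeaderB
            cases hsw : PySem.Chars.startswith (PySem.Chars.strip l) "bin".toList
            · rfl
            · exact absurd (Bool.or_eq_true_iff.mpr (Or.inr hsw)) hh
          have hrow : pvRowA (bins, counts) l
              = (if ((pvParts l).length == 2) = true then
                  match PySem.Int.ofChars? ((pvParts l).getD 0 []),
                        PySem.Int.ofChars? ((pvParts l).getD 1 []) with
                  | some b, none => (bins ++ [b], counts)
                  | some b, some c => (bins ++ [b], counts ++ [c])
                  | _, _ => (bins, counts)
                else (bins, counts)) := by
            simp [pvRowA, hs', hhb]
          rw [hrow]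
          simp only [pvLoopA, hs', he', Bool.false_eq_true, if_false, hh, if_true]
          by_cases hlen : ((pvParts l).length == 2) = true
          · simp only [hlen, if_true]
            cases h0 : PySem.Int.ofChars? ((pvParts l).getD 0 []) with
            | none => exact ih bins counts hpre'
            | some b =>
              cases h1 : PySem.Int.ofChars? ((pvParts l).getD 1 []) with
              | none => exact ih (bins ++ [b]) counts hpre'
              | some c => exact ih (bins ++ [b]) (counts ++ [c]) hpre'
          · simp only [hlen, Bool.false_eq_true, if_false]
            exact ih bins counts hpre'

-- the flag-false phase of A: find the boundaries, then fold pvRowA over the slice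
theorem pvLoopA_false (ls : List (List Char)) :
    (∀ l ∈ ls, ¬(pvStartMark l = true ∧ pvEndMark l = true)) →
    pvLoopA ls false [] []
      = (match pvSectionTW ls with
         | none => ([], [])
         | some sec => sec.foldl pvRowA ([], [])) := by
  induction ls with
  | nil => intro _; rfl
  | cons l rest ih =>
    intro hpre
    by_cases hs : pvStartMark l = true
    · have he : pvEndMark l = false := by
        have := hpre l (by simp)
        cases h : pvEndMark l
        · rfl
        · exact absurd ⟨hs, h⟩ this
      have hsec : pvSectionTW (l :: rest) = some (rest.takeWhile (fun l => !pvEndMark l)) := by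
        unfold pvSectionTW
        simp [he, List.findIdx?_cons, hs]
      rw [hsec]
      simp only [pvLoopA, hs, if_true]
      exact pvLoopA_true rest [] [] (fun x hx => hpre x (by simp [hx]))
    · by_cases he : pvEndMark l = true
      · have hsec : pvSectionTW (l :: rest) = none := by
          unfold pvSectionTW
          simp [he]
        rw [hsec]
        simp [pvLoopA, hs, he]
      · have he' : pvEndMark l = false := by simpa using he
        have hs' : pvStartMark l = false := by simpa using hs
        have hsec : pvSectionTW (l :: rest) = pvSectionTW rest := by
          unfold pvSectionTW
          cases hf : (rest.takeWhile (fun l => !pvEndMark l)).findIdx? pvStartMark with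
          | none => simp [he', List.findIdx?_cons, hs', hf]
          | some k => simp [he', List.findIdx?_cons, hs', hf]
        rw [hsec]
        simp only [pvLoopA, hs', he', Bool.false_eq_true, if_false]
        exact ih (fun x hx => hpre x (by simp [hx]))

-- length invariant of A's fold: the surplus of bins over counts counts the mismatch rows
theorem pvRowA_len (sec : List (List Char)) :
    ∀ bins counts : List Int,
      ((sec.foldl pvRowA (bins, counts)).1.length : Int)
          - ((sec.foldl pvRowA (bins, counts)).2.length : Int)
        = (bins.length : Int) - (counts.length : Int) + (sec.countP pvMismatch : Int) := by
  induction sec with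
  | nil => intro bins counts; simp
  | cons l rest ih =>
    intro bins counts
    rw [List.foldl_cons, List.countP_cons]
    by_cases hm : pvMismatch l = true
    · have hs : pvStartMark l = false := by
        unfold pvMismatch at hm
        cases hv : pvStartMark l
        · rfl
        · rw [hv] at hm; simp at hm
      have hb : pvHeaderB l = false := by
        unfold pvMismatch at hm
        cases hv : pvHeaderB l
        · rfl
        · rw [hv] at hm; simp at hm
      cases hp : pvParts l with
      | nil => exfalso; unfold pvMismatch at hm; rw [hp] at hm; simp [hs, hb] at hm
      | cons a t =>
        cases t with
        | nil => exfalso; unfold pvMismatch at hm; rw [hp] at hm; simp [hs, hb] at hm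
        | cons b t2 =>
          cases t2 with
          | cons c t3 => exfalso; unfold pvMismatch at hm; rw [hp] at hm; simp [hs, hb] at hm
          | nil =>
            have hm2 : (PySem.Int.ofChars? a).isSome = true
                ∧ (PySem.Int.ofChars? b).isNone = true := by
              unfold pvMismatch at hm; rw [hp] at hm; simpa [hs, hb] using hm
            obtain ⟨v, hv0⟩ := Option.isSome_iff_exists.mp hm2.1
            have hv1 : PySem.Int.ofChars? b = none := Option.isNone_iff_eq_none.mp hm2.2
            have hrow : pvRowA (bins, counts) l = (bins ++ [v], counts) := by
              simp [pvRowA, hs, hb, hp, List.getD_eq_getElem?_getD, hv0, hv1]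
            rw [hrow, ih (bins ++ [v]) counts]
            simp [hm]
            omega
    · have hm' : pvMismatch l = false := by simpa using hm
      have hrow : (pvRowA (bins, counts) l).1.length = bins.length
            ∧ (pvRowA (bins, counts) l).2.length = counts.length
          ∨ (pvRowA (bins, counts) l).1.length = bins.length + 1
            ∧ (pvRowA (bins, counts) l).2.length = counts.length + 1 := by
        rw [pvRow_eq_of_not_mismatch l hm' (bins, counts)]
        unfold pvParseRow
        by_cases hsk : (pvStartMark l || pvHeaderB l) = true
        · simp [hsk]
        · simp only [Bool.not_eq_true] at hsk
          simp only [hsk, Bool.false_eq_true, if_false]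
          by_cases hlen : ((pvParts l).length == 2) = true
          · simp only [hlen, if_true]
            cases h0 : PySem.Int.ofChars? ((pvParts l).getD 0 []) with
            | none => simp
            | some b =>
              cases h1 : PySem.Int.ofChars? ((pvParts l).getD 1 []) with
              | none => simp
              | some c => simp
          · simp [hlen]
      rcases hacc : pvRowA (bins, counts) l with ⟨b2, c2⟩
      rw [hacc] at hrow
      rw [ih b2 c2]
      rcases hrow with ⟨hL, hR⟩ | ⟨hL, hR⟩ <;>
        simp only [hL, hR, hm', Bool.false_eq_true, if_false] <;> push_cast <;> omega

-- length invariant of B's fold: bins and counts stay aligned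
theorem pvParseRow_len (sec : List (List Char)) :
    ∀ bins counts : List Int,
      ((sec.foldl pvParseRow (bins, counts)).1.length : Int)
          - ((sec.foldl pvParseRow (bins, counts)).2.length : Int)
        = (bins.length : Int) - (counts.length : Int) := by
  induction sec with
  | nil => intro bins counts; simp
  | cons l rest ih =>
    intro bins counts
    rw [List.foldl_cons]
    have hrow : (pvParseRow (bins, counts) l).1.length = bins.length
          ∧ (pvParseRow (bins, counts) l).2.length = counts.length
        ∨ (pvParseRow (bins, counts) l).1.length = bins.length + 1
          ∧ (pvParseRow (bins, counts) l).2.length = counts.length + 1 := by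
      unfold pvParseRow
      by_cases hsk : (pvStartMark l || pvHeaderB l) = true
      · simp [hsk]
      · simp only [Bool.not_eq_true] at hsk
        simp only [hsk, Bool.false_eq_true, if_false]
        by_cases hlen : ((pvParts l).length == 2) = true
        · simp only [hlen, if_true]
          cases h0 : PySem.Int.ofChars? ((pvParts l).getD 0 []) with
          | none => simp
          | some b =>
            cases h1 : PySem.Int.ofChars? ((pvParts l).getD 1 []) with
            | none => simp
            | some c => simp
        · simp [hlen]
    rcases hacc : pvParseRow (bins, counts) l with ⟨b2, c2⟩
    rw [hacc] at hrow
    rw [ih b2 c2]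
    rcases hrow with ⟨hL, hR⟩ | ⟨hL, hR⟩ <;> simp only [hL, hR] <;> push_cast <;> omega

-- D_ restated over the ports' helper vocabulary
theorem pvD_iff (output : String) :
    D_parse_histogram_output output
      ↔ (((pvLines output).takeWhile (fun l => !pvEndMark l)).dropWhile
          (fun l => !pvStartMark l)).tail.any pvMismatch = true := by
  have h : ∀ xs : List (List Char),
      xs.any (fun l => !PySem.Chars.isIn "# CSV_OUTPUT_START".toList l &&
          !PySem.Chars.startswith (PySem.Chars.strip l) "bin".toList &&
          match PySem.Chars.splitOn (PySem.Chars.strip l) [','] with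
          | [a, b] => (PySem.Int.ofChars? a).isSome && (PySem.Int.ofChars? b).isNone
          | _ => false)
        = xs.any pvMismatch := by
    intro xs
    refine PySem.List.any_congr_mem ?_
    intro x _
    exact (pvMismatch_iff_pred x).symm
  constructor
  · intro hD
    have hD' : (((pvLines output).takeWhile (fun l => !pvEndMark l)).dropWhile
        (fun l => !pvStartMark l)).tail.any
        (fun l => !PySem.Chars.isIn "# CSV_OUTPUT_START".toList l &&
          !PySem.Chars.startswith (PySem.Chars.strip l) "bin".toList &&
          match PySem.Chars.splitOn (PySem.Chars.strip l) [','] with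
          | [a, b] => (PySem.Int.ofChars? a).isSome && (PySem.Int.ofChars? b).isNone
          | _ => false) = true := hD
    rw [h] at hD'
    exact hD'
  · intro hA
    show (((pvLines output).takeWhile (fun l => !pvEndMark l)).dropWhile
        (fun l => !pvStartMark l)).tail.any
        (fun l => !PySem.Chars.isIn "# CSV_OUTPUT_START".toList l &&
          !PySem.Chars.startswith (PySem.Chars.strip l) "bin".toList &&
          match PySem.Chars.splitOn (PySem.Chars.strip l) [','] with
          | [a, b] => (PySem.Int.ofChars? a).isSome && (PySem.Int.ofChars? b).isNone
          | _ => false) = true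
    rw [h]
    exact hA

-- Pre_ restated over the ports' helper vocabulary
theorem pvPre_elim (output : String) (hpre : Pre_parse_histogram_output output) :
    ∀ l ∈ pvLines output, ¬(pvStartMark l = true ∧ pvEndMark l = true) := by
  have hpre0 : (pvLines output).all (fun l => !(pvStartMark l && pvEndMark l)) = true := hpre
  intro l hl hcontra
  have := List.all_eq_true.mp hpre0 l hl
  simp [hcontra.1, hcontra.2] at this

-- ===== VERDICT (by name: the statement is the Claim_ definition above) =====
theorem parse_histogram_output_spec : Claim_unchanged_parse_histogram_output := by
  intro output _ hpre hnd
  unfold parse_histogram_output parse_histogram_output_alt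
  rw [pvSection_eq_TW, pvLoopA_false (pvLines output) (pvPre_elim output hpre)]
  cases hsec : pvSectionTW (pvLines output) with
  | none => rfl
  | some sec =>
    simp only []
    refine PySem.List.foldl_congr_mem _ _ _ _ ?_
    intro acc x hx
    refine pvRow_eq_of_not_mismatch x ?_ acc
    by_contra h
    have hml : pvMismatch x = true := by simpa using h
    apply hnd
    rw [pvD_iff, pvTail_dropWhile]
    unfold pvSectionTW at hsec
    cases hf : ((pvLines output).takeWhile (fun l => !pvEndMark l)).findIdx? pvStartMark with
    | none => rw [hf] at hsec; cases hsec
    | some s0 =>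
      rw [hf] at hsec
      simp only [Option.some.injEq] at hsec
      have hred : (match some s0 with
          | none => ([] : List (List Char))
          | some s => ((pvLines output).takeWhile (fun l => !pvEndMark l)).drop (s + 1)) = sec :=
        hsec
      rw [hred]
      exact List.any_eq_true.mpr ⟨x, hx, hml⟩

theorem parse_histogram_output_changed : Claim_changed_parse_histogram_output := by
  unfold Claim_changed_parse_histogram_output; decide

theorem parse_histogram_output_tight : Claim_exact_parse_histogram_output := by
  intro output _ hpre hD hEq
  have hD' := (pvD_iff output).mp hD
  rw [pvTail_dropWhile] at hD'
  cases hf : ((pvLines output).takeWhile (fun l => !pvEndMark l)).findIdx? pvStartMark with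
  | none => rw [hf] at hD'; simp at hD'
  | some g =>
    rw [hf] at hD'
    rcases List.any_eq_true.mp hD' with ⟨l, hl, hml⟩
    have hsec : pvSectionTW (pvLines output)
        = some (((pvLines output).takeWhile (fun l => !pvEndMark l)).drop (g + 1)) := by
      unfold pvSectionTW
      rw [hf]
    set sec := ((pvLines output).takeWhile (fun l => !pvEndMark l)).drop (g + 1) with hsecdef
    have hA : parse_histogram_output output = sec.foldl pvRowA ([], []) := by
      unfold parse_histogram_output
      rw [pvLoopA_false (pvLines output) (pvPre_elim output hpre), hsec]
    have hB : parse_histogram_output_alt output = sec.foldl pvParseRow ([], []) := by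
      unfold parse_histogram_output_alt
      rw [pvSection_eq_TW, hsec]
    have hcount : 0 < sec.countP pvMismatch := List.countP_pos_iff.mpr ⟨l, hl, hml⟩
    have hlenA := pvRowA_len sec [] []
    have hlenB := pvParseRow_len sec [] []
    rw [hA, hB] at hEq
    rw [hEq] at hlenA
    rw [hlenB] at hlenA
    simp at hlenA
    omega
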